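-- pv_equiv track=rewrite | github.com/asnelzin-dump/rosalind-2 | RosalindWeek2/leader_cyclopep_seq.py | generate_subpeptides
-- ===== SOURCE A (Python) =====
-- def generate_subpeptides(peptide):
--     answer = list()
--     size = len(peptide)
--     for i in range(1, size):
--         for j in range(size):
--             subpeptide = []
--             for k in range(i):
--                 subpeptide.append(peptide[(j + k) % size])
--             answer.append(subpeptide)
--     return answer
-- ===== SOURCE B (Python) =====
-- def generate_subpeptides(peptide):
--     doubled = list(peptide) + list(peptide)
--     n = len(peptide)
--     return [doubled[j:j + i] for i in range(1, n) for j in range(n)]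
-- ===== Notes on version B (the rewrite author's own statement) =====
-- stated objective: simpler
-- what changed: Replaces the three nested append-loops with modular indexing by one comprehension over a doubled copy of the peptide, so each subpeptide is a single slice instead of an element-by-element build.
import Mathlib
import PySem

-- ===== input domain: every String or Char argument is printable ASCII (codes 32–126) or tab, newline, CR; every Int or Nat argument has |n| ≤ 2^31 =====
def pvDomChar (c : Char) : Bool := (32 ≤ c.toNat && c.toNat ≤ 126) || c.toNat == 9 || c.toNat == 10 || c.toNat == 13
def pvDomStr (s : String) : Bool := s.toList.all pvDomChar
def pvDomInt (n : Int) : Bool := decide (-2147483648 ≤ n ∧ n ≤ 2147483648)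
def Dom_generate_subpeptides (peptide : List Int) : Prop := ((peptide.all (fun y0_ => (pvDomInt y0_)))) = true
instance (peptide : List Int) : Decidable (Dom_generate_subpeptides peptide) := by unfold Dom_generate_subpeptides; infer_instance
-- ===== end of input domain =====

-- B replaces the three nested append-loops with modular indexing by one comprehension
-- slicing a doubled copy of the peptide (objective: simpler).

-- ===== PORT A =====
def generate_subpeptides (peptide : List Int) : List (List Int) :=
  let size : Int := peptide.length
  (PySem.List.pyRange 1 size 1).foldl (fun answer i =>
    (PySem.List.pyRange 0 size 1).foldl (fun answer j =>
      answer ++ [(PySem.List.pyRange 0 i 1).foldl (fun sub k =>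
        sub ++ [PySem.List.pyGetD peptide (PySem.Int.mod (j + k) size) 0]) []]) answer) []

-- ===== PORT B =====
def generate_subpeptides_alt (peptide : List Int) : List (List Int) :=
  let doubled := peptide ++ peptide
  let n : Int := peptide.length
  (PySem.List.pyRange 1 n 1).flatMap (fun i =>
    (PySem.List.pyRange 0 n 1).map (fun j =>
      PySem.List.slice doubled (some j) (some (j + i))))

-- ===== PRECONDITION & SPEC =====
def Spec_generate_subpeptides (peptide : List Int) (out : List (List Int)) : Prop := out = generate_subpeptides_alt peptide
instance (peptide : List Int) (out : List (List Int)) : Decidable (Spec_generate_subpeptides peptide out) := by unfold Spec_generate_subpeptides; infer_instance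

-- ===== CLAIM (what is proved, stated in full; the proofs are below) =====
def Claim_equal_generate_subpeptides : Prop := ∀ (peptide : List Int), Dom_generate_subpeptides peptide → Spec_generate_subpeptides peptide (generate_subpeptides peptide)

-- ===== LEMMAS AND PROOFS =====

-- indexing the doubled list is modular indexing of the original
lemma doubled_getElem (peptide : List Int) (m : Nat) (h : m < 2 * peptide.length)
    (h0 : 0 < peptide.length) :
    (peptide ++ peptide)[m]'(by simp; omega) = peptide[m % peptide.length]'(Nat.mod_lt _ h0) := by
  rcases Nat.lt_or_ge m peptide.length with hm | hm
  · have e : m % peptide.length = m := Nat.mod_eq_of_lt hm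
    simp [hm, e]
  · have e : m % peptide.length = m - peptide.length := by
      rw [Nat.mod_eq_sub_mod hm, Nat.mod_eq_of_lt (by omega)]
    simp [List.getElem_append, Nat.not_lt.2 hm, e]

-- the inner k-loop of A builds exactly the slice doubled[j:j+i]
lemma inner_eq_slice (peptide : List Int) (i j : Int)
    (hi1 : 1 ≤ i) (hin : i < (peptide.length : Int))
    (hj0 : 0 ≤ j) (hjn : j < (peptide.length : Int)) :
    (PySem.List.pyRange 0 i 1).foldl (fun sub k =>
        sub ++ [PySem.List.pyGetD peptide (PySem.Int.mod (j + k) (peptide.length : Int)) 0]) []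
      = PySem.List.slice (peptide ++ peptide) (some j) (some (j + i)) := by
  have hL : 0 < peptide.length := by omega
  rw [PySem.List.foldl_append_singleton_eq_map, List.nil_append,
      PySem.List.slice_toNat _ hj0 (by omega), PySem.List.pyRange_one]
  apply List.ext_getElem
  · simp
    omega
  · intro k hk₁ hk₂
    simp only [List.getElem_map, List.getElem_range, List.getElem_take, List.getElem_drop]
    have hk : k < i.toNat := by simpa using hk₁
    have hmod : PySem.Int.mod (j + (0 + (k : Int))) (peptide.length : Int)
        = ((j.toNat + k) % peptide.length : Nat) := by
      rw [PySem.Int.mod_eq_emod_of_pos (by exact_mod_cast hL)]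
      have hc : j + (0 + (k : Int)) = ((j.toNat + k : Nat) : Int) := by push_cast; omega
      rw [hc, Int.natCast_mod]
    rw [hmod, PySem.List.pyGetD_natCast]
    have hmlt : j.toNat + k < 2 * peptide.length := by omega
    rw [doubled_getElem peptide (j.toNat + k) hmlt hL,
        List.getD_eq_getElem _ _ (Nat.mod_lt _ hL)]

-- ===== VERDICT (by name: the statement is the Claim_ definition above) =====
theorem generate_subpeptides_spec : Claim_equal_generate_subpeptides := by
  intro peptide _
  unfold Spec_generate_subpeptides generate_subpeptides generate_subpeptides_alt
  simp only []
  rw [show ((PySem.List.pyRange 1 (peptide.length : Int) 1).foldl (fun answer i =>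
      (PySem.List.pyRange 0 (peptide.length : Int) 1).foldl (fun answer j =>
        answer ++ [(PySem.List.pyRange 0 i 1).foldl (fun sub k =>
          sub ++ [PySem.List.pyGetD peptide (PySem.Int.mod (j + k) (peptide.length : Int)) 0]) []]) answer) [])
    = (PySem.List.pyRange 1 (peptide.length : Int) 1).flatMap (fun i =>
        (PySem.List.pyRange 0 (peptide.length : Int) 1).map (fun j =>
          (PySem.List.pyRange 0 i 1).foldl (fun sub k =>
            sub ++ [PySem.List.pyGetD peptide (PySem.Int.mod (j + k) (peptide.length : Int)) 0]) [])) from ?_]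
  · simp only [List.flatMap_def]
    congr 1
    apply List.map_congr_left
    intro i hi
    apply List.map_congr_left
    intro j hj
    rw [PySem.List.mem_pyRange_one] at hi hj
    exact inner_eq_slice peptide i j hi.1 hi.2 hj.1 hj.2
  · conv_rhs => rw [← List.nil_append (List.flatMap _ _)]
    rw [← PySem.List.foldl_append_eq_flatMap]
    exact List.foldl_ext _ _ []
      (fun a i _ => PySem.List.foldl_append_singleton_eq_map _ _ _)
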